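-- pv_equiv track=rewrite | github.com/ajeseung/Coding_test_practice | 프로그래머스/3/12938. 최고의 집합/최고의 집합.py | solution
-- ===== SOURCE A (Python) =====
-- def solution(n, s):
--     if s < n:
--         return [-1]
--
--     answer = [s//n]*n
--     remain = s%n
--
--     for i in range(remain):
--         answer[-1-i] +=1
--
--     return answer
-- ===== SOURCE B (Python) =====
-- def solution(n, s):
--     if s < n:
--         return [-1]
--     out = []
--     while n > 0:
--         v = -((-s) // n)  # ceiling division: the largest element of the optimal set
--         out.append(v)
--         s -= v
--         n -= 1
--     out.reverse()
--     return out
-- ===== Notes on version B (the rewrite author's own statement) =====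
-- stated objective: alternative
-- what changed: B is a greedy one-pass loop that repeatedly peels off the largest element ceil(s/n) via per-step ceiling division, shrinking s and n each iteration and reversing at the end, instead of A's distribute-the-quotient-then-increment-the-last-r-slots strategy.
import Mathlib
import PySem

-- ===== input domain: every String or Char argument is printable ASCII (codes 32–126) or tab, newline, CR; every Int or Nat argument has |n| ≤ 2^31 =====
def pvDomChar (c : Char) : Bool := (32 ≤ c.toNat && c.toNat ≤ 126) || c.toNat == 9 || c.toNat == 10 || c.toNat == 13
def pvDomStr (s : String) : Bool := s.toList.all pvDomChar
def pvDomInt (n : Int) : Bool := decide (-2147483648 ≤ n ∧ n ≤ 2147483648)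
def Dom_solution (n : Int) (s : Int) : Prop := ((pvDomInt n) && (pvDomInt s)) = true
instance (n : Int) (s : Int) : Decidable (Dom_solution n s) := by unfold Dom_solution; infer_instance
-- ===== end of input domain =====

-- B replaces A's distribute-quotient-then-increment-last-r strategy with a greedy
-- loop that peels off the largest element ceil(s/n) each step and reverses at the
-- end (objective: alternative).

-- ===== PORT A =====
-- Python's mutable list is ported as Array (in-place O(1) update, like Python's).
-- answer[-1-i] += 1 : Python's negative-index in-place increment; on an index
-- out of range Python raises — unreachable under Pre_solution, the guard below
-- only totalizes the function (it leaves the array unchanged there).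
def pyIncNeg (xs : Array Int) (k : Int) : Array Int :=
  let idx : Int := if k < 0 then k + xs.size else k
  if 0 ≤ idx then xs.modify idx.toNat (· + 1) else xs

def solution (n : Int) (s : Int) : List Int :=
  if s < n then [-1]
  else
    let answer := Array.replicate n.toNat (PySem.Int.floordiv s n)
    let remain := PySem.Int.mod s n
    ((PySem.List.pyRange 0 remain 1).foldl (fun acc i => pyIncNeg acc (-1 - i)) answer).toList

-- ===== PORT B =====
-- the while loop: out.append(v); s -= v; n -= 1  (Python's list out as Array, append = push)
def solLoop (n : Int) (s : Int) (out : Array Int) : Array Int :=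
  if _h : 0 < n then
    let v := -(PySem.Int.floordiv (-s) n)
    solLoop (n - 1) (s - v) (out.push v)
  else out
termination_by n.toNat
decreasing_by omega

def solution_alt (n : Int) (s : Int) : List Int :=
  if s < n then [-1]
  else (solLoop n s #[]).toList.reverse

-- ===== PRECONDITION & SPEC =====
-- A raises ZeroDivisionError exactly when n = 0 and the s < n guard fails.
def Pre_solution (n : Int) (s : Int) : Prop := n ≠ 0 ∨ s < n
instance (n : Int) (s : Int) : Decidable (Pre_solution n s) := by unfold Pre_solution; infer_instance
def pvWitness_solution : Int × Int := (3, 7)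

def Spec_solution (n : Int) (s : Int) (out : List Int) : Prop := out = solution_alt n s
instance (n : Int) (s : Int) (out : List Int) : Decidable (Spec_solution n s out) := by unfold Spec_solution; infer_instance

-- ===== CLAIM (what is proved, stated in full; the proofs are below) =====
def Claim_equal_solution : Prop := ∀ (n : Int) (s : Int), Dom_solution n s → Pre_solution n s → Spec_solution n s (solution n s)

-- ===== LEMMAS AND PROOFS =====

-- the common closed form: (n - s%n) copies of s//n followed by s%n copies of s//n + 1
def pvTgt (n : Int) (s : Int) : List Int :=
  List.replicate (n - PySem.Int.mod s n).toNat (PySem.Int.floordiv s n)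
    ++ List.replicate (PySem.Int.mod s n).toNat (PySem.Int.floordiv s n + 1)

-- ---- A's side: the increment loop yields pvTgt ----

-- list shadow of pyIncNeg (Array.modify commutes with toList)
def pyIncNegL (xs : List Int) (k : Int) : List Int :=
  let idx : Int := if k < 0 then k + xs.length else k
  if 0 ≤ idx then xs.modify idx.toNat (· + 1) else xs

theorem pyIncNeg_toList (xs : Array Int) (k : Int) :
    (pyIncNeg xs k).toList = pyIncNegL xs.toList k := by
  simp only [pyIncNeg, pyIncNegL, Array.length_toList]
  split_ifs <;> simp [Array.toList_modify]

theorem pv_modify_rep (m r : Nat) (q : Int) :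
    (List.replicate (m+1) q ++ List.replicate r (q+1)).modify m (· + 1)
    = List.replicate m q ++ List.replicate (r+1) (q+1) := by
  induction m with
  | zero => simp [List.replicate_succ]
  | succ m ih =>
    rw [List.replicate_succ, List.cons_append, List.modify_succ_cons, ih]
    simp [List.replicate_succ]

theorem pv_fold_inc (N r : Nat) (q : Int) (h : r ≤ N) :
    (PySem.List.pyRange 0 (r : Int) 1).foldl (fun acc i => pyIncNegL acc (-1 - i))
      (List.replicate N q)
    = List.replicate (N - r) q ++ List.replicate r (q + 1) := by
  induction r with
  | zero => simp [PySem.List.pyRange_one_eq_nil]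
  | succ r ih =>
    have hr : (((r:Nat)+1 : Nat) : Int) = (r : Int) + 1 := by push_cast; ring
    rw [hr, PySem.List.pyRange_one_succ_right (by positivity), List.foldl_append,
        ih (by omega)]
    simp only [List.foldl]
    have hlen : (List.replicate (N - r) q ++ List.replicate r (q+1)).length = N := by
      simp; omega
    have hm : N - r = (N - r - 1) + 1 := by omega
    unfold pyIncNegL
    rw [hlen]
    have hneg : (-1 - (r:Int)) < 0 := by omega
    rw [if_pos hneg]
    have hidx : (0:Int) ≤ -1 - (r:Int) + (N:Int) := by omega
    rw [if_pos hidx]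
    have htn : (-1 - (r:Int) + (N:Int)).toNat = N - r - 1 := by omega
    rw [hm, htn, pv_modify_rep (N - r - 1) r q]
    have h6 : N - (r + 1) = N - r - 1 := by omega
    rw [h6]

-- transfer the array foldl to the list foldl
theorem pv_fold_toList (xs : List Int) (a : Array Int) :
    (xs.foldl (fun acc i => pyIncNeg acc (-1 - i)) a).toList
    = xs.foldl (fun acc i => pyIncNegL acc (-1 - i)) a.toList := by
  induction xs generalizing a with
  | nil => rfl
  | cons x xs ih => simp [List.foldl, ih, pyIncNeg_toList]

-- ---- B's side: the greedy peel-off loop also yields pvTgt ----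

-- the value peeled off each step is the ceiling of s/n
theorem pv_ceil_eq (n s : Int) (h : 0 < n) :
    -(PySem.Int.floordiv (-s) n)
      = PySem.Int.floordiv s n + (if PySem.Int.mod s n = 0 then 0 else 1) := by
  have hqr := PySem.Int.floordiv_mul_add_mod s n
  have hr0 := PySem.Int.mod_nonneg s h
  have hrn := PySem.Int.mod_lt s h
  rw [PySem.Int.neg_floordiv_neg_eq_iff_of_pos h]
  split_ifs with hz
  · constructor <;> nlinarith
  · have hzlt : 0 < PySem.Int.mod s n := lt_of_le_of_ne hr0 (Ne.symm hz)
    constructor <;> nlinarith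

theorem pv_tgt_step (n s : Int) (h : 1 < n) :
    pvTgt n s
      = pvTgt (n-1) (s - (-(PySem.Int.floordiv (-s) n)))
          ++ [-(PySem.Int.floordiv (-s) n)] := by
  have hn : (0:Int) < n := by omega
  have hn1 : (0:Int) < n - 1 := by omega
  have hqr := PySem.Int.floordiv_mul_add_mod s n
  have hr0 := PySem.Int.mod_nonneg s hn
  have hrn := PySem.Int.mod_lt s hn
  set q := PySem.Int.floordiv s n with hq
  set r := PySem.Int.mod s n with hr
  rw [pv_ceil_eq n s hn, ← hq, ← hr]
  by_cases hz : r = 0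
  · -- v = q ; s - v = q*(n-1), quotient q, remainder 0
    rw [if_pos hz]
    have hq' : PySem.Int.floordiv (s - (q + 0)) (n-1) = q := by
      rw [PySem.Int.floordiv_eq_iff_of_pos hn1]
      constructor <;> nlinarith
    have hr' : PySem.Int.mod (s - (q + 0)) (n-1) = 0 := by
      have := PySem.Int.floordiv_mul_add_mod (s - (q + 0)) (n-1)
      rw [hq'] at this; nlinarith
    unfold pvTgt
    rw [← hq, ← hr, hq', hr', hz]
    have h1 : (n - 1 - 0).toNat + 1 = (n - (0:Int)).toNat := by omega
    simp only [Int.toNat_zero, List.replicate_zero, List.append_nil]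
    rw [← h1, List.replicate_succ']
    simp
  · -- v = q + 1 ; s - v = q*(n-1) + (r-1), quotient q, remainder r-1
    rw [if_neg hz]
    have hq' : PySem.Int.floordiv (s - (q + 1)) (n-1) = q := by
      rw [PySem.Int.floordiv_eq_iff_of_pos hn1]
      have hr1 : 1 ≤ r := by omega
      constructor <;> nlinarith
    have hr' : PySem.Int.mod (s - (q + 1)) (n-1) = r - 1 := by
      have := PySem.Int.floordiv_mul_add_mod (s - (q + 1)) (n-1)
      rw [hq'] at this; nlinarith
    unfold pvTgt
    rw [← hq, ← hr, hq', hr']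
    have h1 : (n - 1 - (r - 1)).toNat = (n - r).toNat := by omega
    have h2 : (r - 1).toNat + 1 = r.toNat := by omega
    rw [h1, List.append_assoc, ← List.replicate_succ', h2]

theorem pv_loop_eq (k : Nat) : ∀ (s : Int) (acc : Array Int),
    (solLoop ((k : Int) + 1) s acc).toList = acc.toList ++ (pvTgt ((k : Int) + 1) s).reverse := by
  induction k with
  | zero =>
    intro s acc
    simp only [Nat.cast_zero, zero_add]
    rw [solLoop, dif_pos (by norm_num : (0:Int) < 1)]
    rw [solLoop, dif_neg (by norm_num)]
    unfold pvTgt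
    simp
  | succ k ih =>
    intro s acc
    rw [solLoop, dif_pos (by push_cast; omega : (0:Int) < ((k+1 : Nat) : Int) + 1)]
    have e1 : ((k+1 : Nat) : Int) + 1 - 1 = (k : Int) + 1 := by push_cast; ring
    rw [e1, ih]
    rw [pv_tgt_step (((k+1 : Nat) : Int) + 1) s (by push_cast; omega)]
    simp

theorem solution_eq (n s : Int) (hpre : Pre_solution n s) :
    solution n s = solution_alt n s := by
  unfold solution solution_alt
  by_cases hlt : s < n
  · simp [hlt]
  · simp only [if_neg hlt]
    rw [pv_fold_toList]
    have hn0 : n ≠ 0 := by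
      rcases hpre with h | h
      · exact h
      · exact absurd h hlt
    rcases lt_or_gt_of_ne hn0 with hneg | hpos
    · -- n < 0 : both sides are the empty list
      have hb := PySem.Int.mod_neg_bounds s hneg
      have h1 : PySem.List.pyRange 0 (PySem.Int.mod s n) 1 = [] :=
        PySem.List.pyRange_one_eq_nil (by omega)
      have h2 : n.toNat = 0 := by omega
      rw [solLoop, dif_neg (by omega)]
      simp [h1, h2]
    · -- n > 0 : both sides equal pvTgt n s
      have hr0 : 0 ≤ PySem.Int.mod s n := PySem.Int.mod_nonneg s hpos
      have hrlt : PySem.Int.mod s n < n := PySem.Int.mod_lt s hpos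
      have hk : n = ((n.toNat - 1 : Nat) : Int) + 1 := by omega
      have hB : (solLoop n s #[]).toList.reverse = pvTgt n s := by
        rw [hk, pv_loop_eq (n.toNat - 1) s #[]]
        simp
      rw [hB]
      have hcast : PySem.Int.mod s n = (((PySem.Int.mod s n).toNat : Nat) : Int) := by omega
      rw [Array.toList_replicate, hcast,
          pv_fold_inc n.toNat (PySem.Int.mod s n).toNat _ (by omega)]
      unfold pvTgt
      have h5 : (n - PySem.Int.mod s n).toNat = n.toNat - (PySem.Int.mod s n).toNat := by
        omega
      rw [h5]

-- ===== VERDICT (by name: the statements are the Claim_ definitions above) =====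
theorem solution_spec : Claim_equal_solution := by
  intro n s _ hpre
  unfold Spec_solution
  exact solution_eq n s hpre
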